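-- pv_equiv track=rewrite | github.com/cdricms/seq5-algo1 | A4-A10.py | players_high_score_plus
-- ===== SOURCE A (Python) =====
-- def players_high_score_plus(data):
--
--     result = []
--     for col in range(len(data)):
--         highest = 0
--         indices = None
--         for row in range(len(data[col])):
--             if data[col][row] > highest:
--                 highest = data[col][row]
--                 indices = (row, data[col][row])
--
--         result.append(indices)
--
--     return result
-- ===== SOURCE B (Python) =====
-- def players_high_score_plus(data):
--     def top(s):
--         m = max(s)
--         return (s.index(m), m)
--     return [top(s) for s in data]
-- ===== Notes on version B (the rewrite author's own statement) =====
-- stated objective: idiomatic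
-- what changed: A's per-row manual tracking loop (running highest with a recorded index pair) is replaced by a reduction max(s) followed by a first-occurrence search s.index(m), a two-pass map; the None fallback rows are excluded by Pre_.
-- outside the precondition, e.g. on players_high_score_plus([[-1]]): A returns [None], B returns [(0, -1)]; on players_high_score_plus([[]]): A returns [None], B raises ValueError; on players_high_score_plus([[0, 0]]): A returns [None], B returns [(0, 0)]
import Mathlib
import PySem

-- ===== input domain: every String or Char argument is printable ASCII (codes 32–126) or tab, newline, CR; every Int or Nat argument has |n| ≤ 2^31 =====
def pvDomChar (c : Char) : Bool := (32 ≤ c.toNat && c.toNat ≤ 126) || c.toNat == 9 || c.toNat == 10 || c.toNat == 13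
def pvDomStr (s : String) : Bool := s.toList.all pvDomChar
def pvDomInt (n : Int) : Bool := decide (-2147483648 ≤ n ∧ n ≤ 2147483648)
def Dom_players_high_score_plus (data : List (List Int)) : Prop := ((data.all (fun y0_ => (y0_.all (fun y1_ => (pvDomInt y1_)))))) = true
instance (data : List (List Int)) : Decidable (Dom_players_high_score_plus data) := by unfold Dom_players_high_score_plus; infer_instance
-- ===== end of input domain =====

-- B replaces A's single tracking loop (running highest + recorded (index, value)) by max then
-- first-occurrence index per row (idiomatic decomposition, same cost).
-- Rows where A records nothing make A return None entries, which are not values of the declared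
-- pair type; Pre_ excludes exactly those rows.

-- ===== PORT A =====
-- A's inner loop: for row in range(len(col)): if col[row] > highest: highest, indices = ...
def phsInnerA (col : List Int) : Int × Option (Int × Int) :=
  (PySem.List.pyRange 0 (PySem.List.len col) 1).foldl
    (fun (st : Int × Option (Int × Int)) row =>
      if st.1 < PySem.List.pyGetD col row 0 then
        (PySem.List.pyGetD col row 0, some (row, PySem.List.pyGetD col row 0))
      else st)
    ((0 : Int), (none : Option (Int × Int)))

-- result.append(indices): a None entry is outside the declared type List (Int × Int); Pre_
-- excludes it, so the .getD default never fires on admitted inputs.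
def players_high_score_plus (data : List (List Int)) : List (Int × Int) :=
  data.foldl (fun result col => result ++ [(phsInnerA col).2.getD (0, 0)]) []

-- ===== PORT B =====
-- B's helper top(s): m = max(s); return (s.index(m), m)
def phsTopB (s : List Int) : Int × Int :=
  let m := (PySem.List.max? s (fun y => y)).getD 0
  ((((PySem.List.index? s m).getD 0 : Nat) : Int), m)

def players_high_score_plus_alt (data : List (List Int)) : List (Int × Int) :=
  data.map phsTopB

-- ===== PRECONDITION & SPEC =====
-- Pre_ excludes data containing a row with no strictly positive element (including empty rows):
-- on such rows A returns a None entry, which is not a value of the declared type List (Int × Int).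
def Pre_players_high_score_plus (data : List (List Int)) : Prop :=
  ∀ s ∈ data, ∃ x ∈ s, (0 : Int) < x
instance (data : List (List Int)) : Decidable (Pre_players_high_score_plus data) := by
  unfold Pre_players_high_score_plus; infer_instance

def pvWitness_players_high_score_plus : List (List Int) := [[3, 1, 3], [-2, 5]]

def Spec_players_high_score_plus (data : List (List Int)) (out : List (Int × Int)) : Prop :=
  out = players_high_score_plus_alt data
instance (data : List (List Int)) (out : List (Int × Int)) :
    Decidable (Spec_players_high_score_plus data out) := by
  unfold Spec_players_high_score_plus; infer_instance

-- ===== CLAIM (what is proved, stated in full; the proofs are below) =====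
def Claim_equal_players_high_score_plus : Prop :=
  ∀ (data : List (List Int)), Dom_players_high_score_plus data →
    Pre_players_high_score_plus data →
    Spec_players_high_score_plus data (players_high_score_plus data)

-- ===== LEMMAS AND PROOFS =====

-- structural form of A's inner tracking loop, with start index i, current highest h
def foldA : List Int → Int → Int → Option (Int × Int) → Int × Option (Int × Int)
  | [], _, h, acc => (h, acc)
  | v :: t, i, h, acc =>
      if h < v then foldA t (i + 1) v (some (i, v)) else foldA t (i + 1) h acc

lemma foldA_eq_enum (s : List Int) : ∀ (i h : Int) (acc : Option (Int × Int)),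
    (PySem.List.enumerate s i).foldl
      (fun (st : Int × Option (Int × Int)) p =>
        if st.1 < p.2 then (p.2, some (p.1, p.2)) else st) (h, acc)
      = foldA s i h acc := by
  induction s with
  | nil => intro i h acc; simp [PySem.List.enumerate_nil, foldA]
  | cons v t ih =>
    intro i h acc
    rw [PySem.List.enumerate_cons]
    simp only [List.foldl_cons, foldA]
    by_cases hv : h < v
    · simp [hv, ih]
    · simp [hv, ih]

lemma phsInnerA_eq_foldA (col : List Int) : phsInnerA col = foldA col 0 0 none := by
  unfold phsInnerA
  rw [show (PySem.List.pyRange 0 (PySem.List.len col) 1).foldl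
      (fun (st : Int × Option (Int × Int)) row =>
        if st.1 < PySem.List.pyGetD col row 0 then
          (PySem.List.pyGetD col row 0, some (row, PySem.List.pyGetD col row 0))
        else st) ((0 : Int), (none : Option (Int × Int)))
      = ((PySem.List.pyRange 0 (PySem.List.len col) 1).map
          (fun j => (j, PySem.List.pyGetD col j 0))).foldl
          (fun (st : Int × Option (Int × Int)) p =>
            if st.1 < p.2 then (p.2, some (p.1, p.2)) else st)
          ((0 : Int), (none : Option (Int × Int)))
      from by rw [List.foldl_map]]
  rw [← PySem.List.enumerate_eq_map_pyRange]
  exact foldA_eq_enum col 0 0 none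

lemma foldA_none (s : List Int) : ∀ (i h : Int) (acc : Option (Int × Int)),
    (∀ x ∈ s, x ≤ h) → foldA s i h acc = (h, acc) := by
  induction s with
  | nil => intro i h acc _; simp [foldA]
  | cons v t ih =>
    intro i h acc hall
    have hv : v ≤ h := hall v (by simp)
    simp only [foldA, if_neg (not_lt.mpr hv)]
    exact ih _ _ _ (fun x hx => hall x (List.mem_cons_of_mem _ hx))

lemma foldl_max_mem' (t : List Int) (a : Int) : t.foldl max a = a ∨ t.foldl max a ∈ t :=
  PySem.List.foldl_max_mem t a

lemma foldA_spec (s : List Int) : ∀ (i h : Int) (acc : Option (Int × Int)),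
    (∃ x ∈ s, h < x) →
    foldA s i h acc =
      (s.foldl max h,
       some (i + (((PySem.List.index? s (s.foldl max h)).getD 0 : Nat) : Int), s.foldl max h)) := by
  induction s with
  | nil => intro i h acc hx; simp at hx
  | cons v t ih =>
    intro i h acc hx
    have hM : (v :: t).foldl max h = t.foldl max (max h v) := by simp
    by_cases hv : h < v
    · have hmax : max h v = v := max_eq_right (le_of_lt hv)
      by_cases ht : ∃ x ∈ t, v < x
      · -- recurse; final max lies in t and differs from v
        have hrec := ih (i + 1) v (some (i, v)) ht
        obtain ⟨x, hxm, hxv⟩ := ht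
        have hxle : x ≤ t.foldl max v := (PySem.List.le_foldl_max t v).2 x hxm
        have hvM : v < t.foldl max v := lt_of_lt_of_le hxv hxle
        have hMt : t.foldl max v ∈ t := by
          rcases foldl_max_mem' t v with h1 | h1
          · exact absurd h1 (by omega)
          · exact h1
        have hne : v ≠ t.foldl max v := by omega
        have hidx : PySem.List.index? (v :: t) (t.foldl max v)
            = (PySem.List.index? t (t.foldl max v)).map (· + 1) :=
          PySem.List.index?_cons_of_ne t hne
        obtain ⟨k, hk⟩ : ∃ k, PySem.List.index? t (t.foldl max v) = some k := by
          cases hc : PySem.List.index? t (t.foldl max v) with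
          | none => exact absurd ((PySem.List.index?_eq_none_iff t _).mp hc) (not_not_intro hMt)
          | some k => exact ⟨k, rfl⟩
        simp only [foldA, if_pos hv]
        rw [hrec, hM, hmax, hidx, hk]
        simp only [Option.map_some, Option.getD_some]
        rw [show i + 1 + (k : Int) = i + ((k + 1 : Nat) : Int) by push_cast; ring]
      · -- all of t ≤ v: the recorded pair (i, v) survives and v is the max
        push Not at ht
        have hstop := foldA_none t (i + 1) v (some (i, v)) ht
        have hMv : t.foldl max v = v := by
          rcases foldl_max_mem' t v with h1 | h1
          · exact h1
          · exact le_antisymm (ht _ h1) ((PySem.List.le_foldl_max t v).1)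
        simp only [foldA, if_pos hv]
        rw [hstop, hM, hmax, hMv, PySem.List.index?_cons_self]
        simp
    · -- v ≤ h: the head is skipped and does not change the running max
      have hvle : v ≤ h := not_lt.mp hv
      have hmax : max h v = h := max_eq_left hvle
      have ht : ∃ x ∈ t, h < x := by
        obtain ⟨x, hxm, hxh⟩ := hx
        rcases List.mem_cons.mp hxm with rfl | hxt
        · omega
        · exact ⟨x, hxt, hxh⟩
      have hrec := ih (i + 1) h acc ht
      obtain ⟨x, hxm, hxh⟩ := ht
      have hxle : x ≤ t.foldl max h := (PySem.List.le_foldl_max t h).2 x hxm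
      have hhM : h < t.foldl max h := lt_of_lt_of_le hxh hxle
      have hMt : t.foldl max h ∈ t := by
        rcases foldl_max_mem' t h with h1 | h1
        · exact absurd h1 (by omega)
        · exact h1
      have hne : v ≠ t.foldl max h := by omega
      have hidx : PySem.List.index? (v :: t) (t.foldl max h)
          = (PySem.List.index? t (t.foldl max h)).map (· + 1) :=
        PySem.List.index?_cons_of_ne t hne
      obtain ⟨k, hk⟩ : ∃ k, PySem.List.index? t (t.foldl max h) = some k := by
        cases hc : PySem.List.index? t (t.foldl max h) with
        | none => exact absurd ((PySem.List.index?_eq_none_iff t _).mp hc) (not_not_intro hMt)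
        | some k => exact ⟨k, rfl⟩
      simp only [foldA, if_neg hv]
      rw [hrec, hM, hmax, hidx, hk]
      simp only [Option.map_some, Option.getD_some]
      rw [show i + 1 + (k : Int) = i + ((k + 1 : Nat) : Int) by push_cast; ring]

lemma foldl_max_comm (t : List Int) : ∀ (a b : Int),
    t.foldl max (max a b) = max a (t.foldl max b) := by
  induction t with
  | nil => intro a b; simp
  | cons c t ih =>
    intro a b
    simp only [List.foldl_cons]
    rw [max_assoc, ih]

-- per-row agreement on rows admitted by Pre_
lemma row_eq (s : List Int) (hx : ∃ x ∈ s, (0 : Int) < x) :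
    (phsInnerA s).2.getD (0, 0) = phsTopB s := by
  obtain ⟨v, t, rfl⟩ : ∃ v t, s = v :: t := by
    cases s with
    | nil => simp at hx
    | cons v t => exact ⟨v, t, rfl⟩
  have hm : (PySem.List.max? (v :: t) (fun y => y)).getD 0 = t.foldl max v := by
    rw [PySem.List.max?_id_cons]; rfl
  have hpos : 0 < t.foldl max v := by
    obtain ⟨x, hxm, hx0⟩ := hx
    rcases List.mem_cons.mp hxm with rfl | hxt
    · exact lt_of_lt_of_le hx0 (PySem.List.le_foldl_max t x).1
    · exact lt_of_lt_of_le hx0 ((PySem.List.le_foldl_max t v).2 x hxt)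
  have hM0 : (v :: t).foldl max 0 = t.foldl max v := by
    have : (v :: t).foldl max 0 = t.foldl max (max 0 v) := by simp
    rw [this, foldl_max_comm t 0 v, max_eq_right (le_of_lt hpos)]
  rw [phsInnerA_eq_foldA, foldA_spec (v :: t) 0 0 none hx, hM0]
  unfold phsTopB
  simp only [hm]
  simp

lemma foldl_append_singleton {α β : Type} (l : List α) (g : α → β) :
    ∀ acc : List β, l.foldl (fun r c => r ++ [g c]) acc = acc ++ l.map g := by
  induction l with
  | nil => intro acc; simp
  | cons c t ih => intro acc; simp [ih]

-- ===== VERDICT (by name: the statement is the Claim_ definition above) =====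
theorem players_high_score_plus_spec : Claim_equal_players_high_score_plus := by
  intro data _ hpre
  unfold Spec_players_high_score_plus players_high_score_plus players_high_score_plus_alt
  rw [foldl_append_singleton data (fun col => (phsInnerA col).2.getD (0, 0)) []]
  simp only [List.nil_append]
  exact List.map_congr_left (fun s hs => row_eq s (hpre s hs))
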